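-- pv_equiv track=rewrite | github.com/MengBanana/Tweet_Cloud | process_tweets.py | clean_line
-- ===== SOURCE A (Python) =====
-- from string import ascii_letters
--
-- def clean_line(line):
--     '''
--     Eliminates all non-alphabetical characters, except ' ', '@'' and '#',
--     from the line.
--     >>> clean_line("This is a #hashtag!, this a is a Number123  @userName")
--     'this is a #hashtag this a is a number  @username'
--
--     Hint: you can check if a character is alphabetical with this
--     expression:
--     `char in ascii_letters`
--     '''
--     # your code here
--     temp = []
--     candidate_letters = ascii_letters+' @#'
--     for c in line:
--         if c in candidate_letters:
--             temp.append(c)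
--
--     line = ''.join(temp)
--
--     return line
-- ===== SOURCE B (Python) =====
-- import re
--
-- _DISALLOWED = re.compile(r'[^A-Za-z @#]')
--
-- def clean_line(line):
--     return _DISALLOWED.sub('', line)
-- ===== Notes on version B (the rewrite author's own statement) =====
-- stated objective: idiomatic
-- what changed: Replaced the explicit loop with per-character membership test and list-append accumulator by a single precompiled regex substitution deleting every character outside the class [A-Za-z @#].
import Mathlib
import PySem

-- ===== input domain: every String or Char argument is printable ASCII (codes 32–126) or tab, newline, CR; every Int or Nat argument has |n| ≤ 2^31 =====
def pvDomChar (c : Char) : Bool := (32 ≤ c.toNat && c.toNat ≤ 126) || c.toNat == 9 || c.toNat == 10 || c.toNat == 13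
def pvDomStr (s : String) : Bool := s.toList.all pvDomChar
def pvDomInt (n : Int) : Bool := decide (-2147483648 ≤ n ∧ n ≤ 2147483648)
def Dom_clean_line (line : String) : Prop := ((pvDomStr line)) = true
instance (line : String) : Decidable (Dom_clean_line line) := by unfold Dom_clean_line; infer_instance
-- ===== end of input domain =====

-- B replaces A's explicit loop-and-append over a 55-character membership string by a
-- single regex substitution deleting every character outside [A-Za-z @#] (idiomatic).


-- ===== PORT A =====
-- candidate_letters = ascii_letters + ' @#'
def candidateLetters : List Char :=
  "abcdefghijklmnopqrstuvwxyzABCDEFGHIJKLMNOPQRSTUVWXYZ @#".toList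

def clean_line (line : String) : String :=
  -- temp = []; for c in line: if c in candidate_letters: temp.append(c); return ''.join(temp)
  String.mk (line.toList.foldl
    (fun temp c => if candidateLetters.contains c then temp ++ [c] else temp) [])

-- ===== PORT B =====
-- re.sub(r'[^A-Za-z @#]', '', line): delete every character not matching the class,
-- i.e. keep exactly the characters matching it (ported as the corresponding filter).
def inClassB (c : Char) : Bool :=
  ('A' ≤ c && c ≤ 'Z') || ('a' ≤ c && c ≤ 'z') || c == ' ' || c == '@' || c == '#'

def clean_line_alt (line : String) : String :=
  String.mk (line.toList.filter inClassB)

-- ===== PRECONDITION & SPEC =====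
def Spec_clean_line (line : String) (out : String) : Prop := out = clean_line_alt line
instance (line : String) (out : String) : Decidable (Spec_clean_line line out) := by unfold Spec_clean_line; infer_instance

-- ===== CLAIM (what is proved, stated in full; the proofs are below) =====
def Claim_equal_clean_line : Prop := ∀ (line : String), Dom_clean_line line → Spec_clean_line line (clean_line line)

-- ===== LEMMAS AND PROOFS =====
theorem mem_candidate_iff (c : Char) : c ∈ candidateLetters ↔ inClassB c = true := by
  simp only [candidateLetters, inClassB, show ("abcdefghijklmnopqrstuvwxyzABCDEFGHIJKLMNOPQRSTUVWXYZ @#".toList : List Char) = ['a','b','c','d','e','f','g','h','i','j','k','l','m','n','o','p','q','r','s','t','u','v','w','x','y','z','A','B','C','D','E','F','G','H','I','J','K','L','M','N','O','P','Q','R','S','T','U','V','W','X','Y','Z',' ','@','#'] from rfl,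
    List.mem_cons, List.not_mem_nil, or_false, Bool.or_eq_true, Bool.and_eq_true,
    decide_eq_true_eq, beq_iff_eq, Char.le_def, Char.ext_iff, UInt32.le_iff_toNat_le, UInt32.toNat_inj.symm,
    show ('a': Char).val.toNat = 97 from rfl, show ('b': Char).val.toNat = 98 from rfl, show ('c': Char).val.toNat = 99 from rfl, show ('d': Char).val.toNat = 100 from rfl, show ('e': Char).val.toNat = 101 from rfl, show ('f': Char).val.toNat = 102 from rfl, show ('g': Char).val.toNat = 103 from rfl, show ('h': Char).val.toNat = 104 from rfl, show ('i': Char).val.toNat = 105 from rfl, show ('j': Char).val.toNat = 106 from rfl, show ('k': Char).val.toNat = 107 from rfl, show ('l': Char).val.toNat = 108 from rfl, show ('m': Char).val.toNat = 109 from rfl, show ('n': Char).val.toNat = 110 from rfl, show ('o': Char).val.toNat = 111 from rfl, show ('p': Char).val.toNat = 112 from rfl, show ('q': Char).val.toNat = 113 from rfl, show ('r': Char).val.toNat = 114 from rfl, show ('s': Char).val.toNat = 115 from rfl, show ('t': Char).val.toNat = 116 from rfl, show ('u': Char).val.toNat = 117 from rfl, show ('v': Char).val.toNat = 118 from rfl,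 show ('w': Char).val.toNat = 119 from rfl, show ('x': Char).val.toNat = 120 from rfl, show ('y': Char).val.toNat = 121 from rfl, show ('z': Char).val.toNat = 122 from rfl, show ('A': Char).val.toNat = 65 from rfl, show ('B': Char).val.toNat = 66 from rfl, show ('C': Char).val.toNat = 67 from rfl, show ('D': Char).val.toNat = 68 from rfl, show ('E': Char).val.toNat = 69 from rfl, show ('F': Char).val.toNat = 70 from rfl, show ('G': Char).val.toNat = 71 from rfl, show ('H': Char).val.toNat = 72 from rfl, show ('I': Char).val.toNat = 73 from rfl, show ('J': Char).val.toNat = 74 from rfl, show ('K': Char).val.toNat = 75 from rfl, show ('L': Char).val.toNat = 76 from rfl, show ('M': Char).val.toNat = 77 from rfl, show ('N': Char).val.toNat = 78 from rfl, show ('O': Char).val.toNat = 79 from rfl, show ('P': Char).val.toNat = 80 from rfl, show ('Q': Char).val.toNat = 81 from rfl, show ('R': Char).val.toNat = 82 from rfl, show ('S': Char).val.toNat = 83 from rfl, show ('T': Char).val.toNat = 84 from rfl, show ('U': Char).val.toNat = 85 from rfl, show ('V': Char).val.toNat = 86 from rfl, show ('W': Char).val.toNat = 87 from rfl, show ('X':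 Char).val.toNat = 88 from rfl, show ('Y': Char).val.toNat = 89 from rfl, show ('Z': Char).val.toNat = 90 from rfl, show (' ': Char).val.toNat = 32 from rfl, show ('@': Char).val.toNat = 64 from rfl, show ('#': Char).val.toNat = 35 from rfl]
  omega

theorem contains_eq_inClassB (c : Char) : candidateLetters.contains c = inClassB c := by
  cases h : inClassB c <;>
    simp [List.contains_eq_mem, mem_candidate_iff, h]

-- ===== VERDICT (by name: the statement is the Claim_ definition above) =====
theorem clean_line_spec : Claim_equal_clean_line := by
  intro line _
  unfold Spec_clean_line clean_line clean_line_alt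
  rw [PySem.List.foldl_append_if_eq_filter]
  simp [List.filter_congr (fun c _ => contains_eq_inClassB c)]
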